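-- pv_equiv track=rewrite | github.com/hcnam/sim-cerberus | sim-cerberus/calculate.py | reduce_to_size_count
-- ===== SOURCE A (Python) =====
-- def reduce_to_size_count(sublists: list[list[int]]) -> tuple[list[list[int]], list[list[int]]]:
--     sublists_size = [[] for _ in range(len(sublists))]
--     sublists_count = [[] for _ in range(len(sublists))]
--     for i in range(len(sublists)):
--         for cur in sublists[i]:
--             if not sublists_size[i] or sublists_size[i][-1] != cur:
--                 sublists_size[i].append(cur)
--                 sublists_count[i].append(1)
--             else:
--                 sublists_count[i][-1] += 1
--     return sublists_size, sublists_count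
-- ===== SOURCE B (Python) =====
-- def reduce_to_size_count(sublists: list[list[int]]) -> tuple[list[list[int]], list[list[int]]]:
--     sizes, counts = [], []
--     for sub in sublists:
--         vals, cnts = [], []
--         i, n = 0, len(sub)
--         while i < n:
--             j = i + 1
--             while j < n and sub[j] == sub[i]:
--                 j += 1
--             vals.append(sub[i])
--             cnts.append(j - i)
--             i = j
--         sizes.append(vals)
--         counts.append(cnts)
--     return sizes, counts
-- ===== Notes on version B (the rewrite author's own statement) =====
-- stated objective: alternative
-- what changed: B run-length encodes each sublist with a two-pointer run scan (advance j to the end of each run, emit value and j-i at once) instead of A's per-element compare-with-last branch that appends or increments in place into preallocated index-addressed lists.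
import Mathlib
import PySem

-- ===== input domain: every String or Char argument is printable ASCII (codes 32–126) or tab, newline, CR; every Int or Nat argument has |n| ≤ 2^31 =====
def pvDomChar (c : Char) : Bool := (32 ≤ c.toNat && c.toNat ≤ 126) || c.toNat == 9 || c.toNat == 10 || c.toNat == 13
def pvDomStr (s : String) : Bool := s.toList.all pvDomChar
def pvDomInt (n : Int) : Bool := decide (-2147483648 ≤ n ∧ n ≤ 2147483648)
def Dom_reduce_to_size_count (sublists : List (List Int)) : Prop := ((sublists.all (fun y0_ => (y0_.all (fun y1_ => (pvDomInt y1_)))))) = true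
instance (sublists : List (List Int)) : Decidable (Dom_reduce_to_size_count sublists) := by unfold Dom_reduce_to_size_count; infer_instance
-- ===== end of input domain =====

-- B replaces A's per-element compare-with-last append/increment into preallocated
-- index-addressed lists by a two-pointer run scan per sublist (alternative, same cost).

-- ===== PORT A =====
-- one step of A's inner loop: element `cur` of sublist i, acting on the two big lists
def innerA (i : Nat) (st : List (List Int) × List (List Int)) (cur : Int) :
    List (List Int) × List (List Int) :=
  let si := st.1.getD i []
  if si = [] ∨ si.getLast? ≠ some cur then
    (st.1.set i (si ++ [cur]), st.2.set i ((st.2.getD i []) ++ [1]))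
  else
    (st.1, st.2.set i ((st.2.getD i []).dropLast ++ [(st.2.getD i []).getLast?.getD 0 + 1]))

def reduce_to_size_count (sublists : List (List Int)) : List (List Int) × List (List Int) :=
  (List.range sublists.length).foldl
    (fun st i => (sublists.getD i []).foldl (innerA i) st)
    (List.replicate sublists.length ([] : List Int),
     List.replicate sublists.length ([] : List Int))

-- ===== PORT B =====
-- the runs of a sublist: (value, length of the maximal run starting at it), two-pointer scan
def runsB (sub : List Int) : List (Int × Int) :=
  match sub with
  | [] => []
  | x :: rest =>
    (x, 1 + ((rest.takeWhile (fun y => y == x)).length : Int)) ::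
      runsB (rest.dropWhile (fun y => y == x))
termination_by sub.length
decreasing_by
  simp only [List.length_cons]
  exact Nat.lt_succ_of_le (List.length_dropWhile_le _ _)

def reduce_to_size_count_alt (sublists : List (List Int)) : List (List Int) × List (List Int) :=
  (sublists.map (fun sub => (runsB sub).map Prod.fst),
   sublists.map (fun sub => (runsB sub).map Prod.snd))

-- ===== PRECONDITION & SPEC =====
def Spec_reduce_to_size_count (sublists : List (List Int)) (out : List (List Int) × List (List Int)) : Prop := out = reduce_to_size_count_alt sublists
instance (sublists : List (List Int)) (out : List (List Int) × List (List Int)) : Decidable (Spec_reduce_to_size_count sublists out) := by unfold Spec_reduce_to_size_count; infer_instance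

-- ===== CLAIM (what is proved, stated in full; the proofs are below) =====
def Claim_equal_reduce_to_size_count : Prop := ∀ (sublists : List (List Int)), Dom_reduce_to_size_count sublists → Spec_reduce_to_size_count sublists (reduce_to_size_count sublists)

-- ===== LEMMAS AND PROOFS =====

-- A's inner step on the single pair it actually touches
def stepPair (p : List Int × List Int) (cur : Int) : List Int × List Int :=
  if p.1 = [] ∨ p.1.getLast? ≠ some cur then (p.1 ++ [cur], p.2 ++ [1])
  else (p.1, p.2.dropLast ++ [p.2.getLast?.getD 0 + 1])

-- A's per-sublist run-length encoding
def rleA (xs : List Int) : List Int × List Int := xs.foldl stepPair ([], [])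

-- direct recursive form of foldl stepPair with the last (open) run (v, k)
def rleAux (v k : Int) (xs : List Int) : List Int × List Int :=
  match xs with
  | [] => ([v], [k])
  | x :: xs => if x = v then rleAux v (k + 1) xs
               else (v :: (rleAux x 1 xs).1, k :: (rleAux x 1 xs).2)

theorem getD_set_self {α : Type} (l : List α) (i : Nat) (x d : α) (h : i < l.length) :
    (l.set i x).getD i d = x := by
  induction l generalizing i with
  | nil => simp at h
  | cons a l ih =>
    cases i with
    | zero => simp [List.getD]
    | succ j => simpa [List.getD] using ih j (by simpa using h)

theorem set_getD_self {α : Type} (l : List α) (i : Nat) (d : α) (h : i < l.length) :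
    l.set i (l.getD i d) = l := by
  induction l generalizing i with
  | nil => simp at h
  | cons a l ih =>
    cases i with
    | zero => simp [List.getD]
    | succ j => simpa [List.getD] using ih j (by simpa using h)

-- locality: the inner fold only reads and writes index i of the big state
theorem foldl_innerA (xs : List Int) (i : Nat) (st : List (List Int) × List (List Int))
    (h1 : i < st.1.length) (h2 : i < st.2.length) :
    xs.foldl (innerA i) st =
      (st.1.set i (xs.foldl stepPair (st.1.getD i [], st.2.getD i [])).1,
       st.2.set i (xs.foldl stepPair (st.1.getD i [], st.2.getD i [])).2) := by
  induction xs generalizing st with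
  | nil =>
    rw [List.foldl_nil, List.foldl_nil, Prod.ext_iff]
    exact ⟨(set_getD_self _ _ _ h1).symm, (set_getD_self _ _ _ h2).symm⟩
  | cons x xs ih =>
    rw [List.foldl_cons, List.foldl_cons]
    by_cases hc : st.1.getD i [] = [] ∨ ¬ (st.1.getD i []).getLast? = some x
    · have hstep : innerA i st x =
          (st.1.set i (st.1.getD i [] ++ [x]), st.2.set i (st.2.getD i [] ++ [1])) := by
        simp only [innerA]; rw [if_pos hc]
      have hsp : stepPair (st.1.getD i [], st.2.getD i []) x =
          (st.1.getD i [] ++ [x], st.2.getD i [] ++ [1]) := by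
        simp only [stepPair]; rw [if_pos hc]
      rw [hstep, hsp,
        ih _ (by simpa using h1) (by simpa using h2),
        getD_set_self _ _ _ _ (by simpa using h1),
        getD_set_self _ _ _ _ (by simpa using h2), List.set_set, List.set_set]
    · have hstep : innerA i st x =
          (st.1, st.2.set i ((st.2.getD i []).dropLast ++ [(st.2.getD i []).getLast?.getD 0 + 1])) := by
        simp only [innerA]; rw [if_neg hc]
      have hsp : stepPair (st.1.getD i [], st.2.getD i []) x =
          (st.1.getD i [], (st.2.getD i []).dropLast ++ [(st.2.getD i []).getLast?.getD 0 + 1]) := by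
        simp only [stepPair]; rw [if_neg hc]
      rw [hstep, hsp,
        ih _ (by simpa using h1) (by simpa using h2),
        getD_set_self _ _ _ _ (by simpa using h2), List.set_set]

theorem foldl_stepPair_concat (xs : List Int) (v k : Int) (acc1 acc2 : List Int) :
    xs.foldl stepPair (acc1 ++ [v], acc2 ++ [k]) =
      (acc1 ++ (rleAux v k xs).1, acc2 ++ (rleAux v k xs).2) := by
  induction xs generalizing v k acc1 acc2 with
  | nil => simp [rleAux]
  | cons x xs ih =>
    rw [List.foldl_cons]
    by_cases hxv : x = v
    · have hsp : stepPair (acc1 ++ [v], acc2 ++ [k]) x = (acc1 ++ [v], acc2 ++ [k + 1]) := by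
        simp [stepPair, hxv]
      rw [hsp, ih v (k + 1) acc1 acc2]
      simp [rleAux, hxv]
    · have hsp : stepPair (acc1 ++ [v], acc2 ++ [k]) x =
          ((acc1 ++ [v]) ++ [x], (acc2 ++ [k]) ++ [1]) := by
        simp [stepPair, Ne.symm hxv]
      rw [hsp, ih x 1 (acc1 ++ [v]) (acc2 ++ [k])]
      simp [rleAux, hxv]

theorem rleAux_eq_runsB (xs : List Int) (v k : Int) :
    rleAux v k xs =
      (v :: (runsB (xs.dropWhile (fun y => y == v))).map Prod.fst,
       (k + ((xs.takeWhile (fun y => y == v)).length : Int)) ::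
         (runsB (xs.dropWhile (fun y => y == v))).map Prod.snd) := by
  induction xs generalizing v k with
  | nil => simp [rleAux, runsB]
  | cons x xs ih =>
    by_cases hxv : x = v
    · have hb : (x == v) = true := by simp [hxv]
      rw [show rleAux v k (x :: xs) = rleAux v (k + 1) xs by simp [rleAux, hxv],
        ih v (k + 1),
        List.dropWhile_cons_of_pos (p := fun y => y == v) (a := x) hb,
        List.takeWhile_cons_of_pos (p := fun y => y == v) (a := x) hb]
      simp; omega
    · have hb : (x == v) = false := by simp [hxv]
      rw [show rleAux v k (x :: xs) = (v :: (rleAux x 1 xs).1, k :: (rleAux x 1 xs).2) by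
            simp [rleAux, hxv],
        ih x 1,
        List.dropWhile_cons_of_neg (p := fun y => y == v) (a := x) (by simp [hb]),
        List.takeWhile_cons_of_neg (p := fun y => y == v) (a := x) (by simp [hb])]
      simp [runsB]

theorem rleA_eq_runsB (xs : List Int) :
    rleA xs = ((runsB xs).map Prod.fst, (runsB xs).map Prod.snd) := by
  cases xs with
  | nil => simp [rleA, runsB]
  | cons x xs =>
    have h0 : stepPair ([], []) x = ([] ++ [x], [] ++ [1]) := by simp [stepPair]
    rw [rleA, List.foldl_cons, h0, foldl_stepPair_concat, rleAux_eq_runsB]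
    simp [runsB]

-- helpers for the outer loop: the big lists are (done part) ++ (untouched part)
theorem getD_append_cons {α : Type} (l : List α) (y : α) (r : List α) (d : α) (k : Nat)
    (h : l.length = k) : (l ++ y :: r).getD k d = y := by
  induction l generalizing k with
  | nil => subst h; rfl
  | cons a l ih =>
    subst h
    simp only [List.length_cons, List.cons_append, List.getD_cons_succ]
    exact ih _ rfl

theorem set_append_cons {α : Type} (l : List α) (y z : α) (r : List α) (k : Nat)
    (h : l.length = k) : (l ++ y :: r).set k z = l ++ z :: r := by
  induction l generalizing k with
  | nil => subst h; rfl
  | cons a l ih => subst h; simp [ih _ rfl]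

theorem take_succ_getD (l : List (List Int)) (k : Nat) (h : k < l.length) :
    l.take (k + 1) = l.take k ++ [l.getD k []] := by
  induction l generalizing k with
  | nil => simp at h
  | cons a l ih =>
    cases k with
    | zero => simp [List.getD]
    | succ j => simpa [List.getD] using ih j (by simpa using h)

theorem outer_invariant (sublists : List (List Int)) (k : Nat) (hk : k ≤ sublists.length) :
    (List.range k).foldl
      (fun st i => (sublists.getD i []).foldl (innerA i) st)
      (List.replicate sublists.length ([] : List Int),
       List.replicate sublists.length ([] : List Int)) =
    ((sublists.take k).map (fun s => (rleA s).1) ++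
       List.replicate (sublists.length - k) [],
     (sublists.take k).map (fun s => (rleA s).2) ++
       List.replicate (sublists.length - k) []) := by
  induction k with
  | zero => simp
  | succ k ih =>
    have hk' : k < sublists.length := hk
    rw [List.range_succ, List.foldl_append, ih (Nat.le_of_lt hk'), List.foldl_cons,
      List.foldl_nil]
    have hlen : ((sublists.take k).map (fun s => (rleA s).1)).length = k := by
      simp [Nat.min_eq_left (Nat.le_of_lt hk')]
    have hlen2 : ((sublists.take k).map (fun s => (rleA s).2)).length = k := by
      simp [Nat.min_eq_left (Nat.le_of_lt hk')]
    have hrep : List.replicate (sublists.length - k) ([] : List Int) =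
        [] :: List.replicate (sublists.length - (k + 1)) [] := by
      rw [show sublists.length - k = (sublists.length - (k + 1)) + 1 by omega,
        List.replicate_succ]
    rw [hrep, foldl_innerA _ k _ (by simp; omega) (by simp; omega),
      getD_append_cons _ _ _ _ _ hlen, getD_append_cons _ _ _ _ _ hlen2,
      set_append_cons _ _ _ _ _ hlen, set_append_cons _ _ _ _ _ hlen2,
      take_succ_getD _ _ hk']
    simp [rleA]

-- ===== VERDICT (by name: the statement is the Claim_ definition above) =====
theorem reduce_to_size_count_spec : Claim_equal_reduce_to_size_count := by
  intro sublists _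
  show reduce_to_size_count sublists = reduce_to_size_count_alt sublists
  rw [reduce_to_size_count, outer_invariant sublists sublists.length le_rfl]
  simp [reduce_to_size_count_alt, rleA_eq_runsB]
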